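-- pv_equiv track=rewrite | github.com/ayumoesylv/new-project | Ch_13_ex.py | change_file
-- ===== SOURCE A (Python) =====
-- import string
--
-- def change_file(file):
--     """
--     Reads a text file and converts each line to lowercase words without whitespace or punctuation
--
--     params:
--         file (file object): a text file passed through with words in each line
--
--     Other args:
--         string.whitespace (str): a string of spaces, tabs, etc. characters
--         string.punctuation (str): a string of punctuation
--
--     returns:
--         None
--
--     raises:
--         None
--     """
--     wordlist = []
--     for part in file:
--         line = part.split()
--         for word in line:
--             word = change_word(word)
--             wordlist.append(word)
--         # temp = ''
--         # for letter in word: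
--         #     if (letter not in string.whitespace) and (letter not in string.punctuation):
--         #         temp += letter
--         # temp = temp.lower()
--     return wordlist
--
-- def change_word(word):
--     """
--     converts each word to lowercase words without whitespace or punctuation
--
--     params
--         word (str): passed in raw word to be transformed
--
--     returns
--         temp (str): modified word in lowercase without whitespace or punctuation (standardized word)
--
--     raises
--         None
--     """
--     word = word.strip()
--     temp = ''
--     for letter in word:
--         if (letter not in string.whitespace) and (letter not in string.punctuation):
--             temp += letter
--     temp = temp.lower()
--     return temp
-- ===== SOURCE B (Python) =====
-- import string
--
--
-- def change_file(file):
--     wordlist = []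
--     for line in file:
--         cur = None
--         for ch in line:
--             if ch.isspace():
--                 if cur is not None:
--                     wordlist.append(cur)
--                     cur = None
--             else:
--                 if cur is None:
--                     cur = ''
--                 if ch not in string.punctuation:
--                     cur += ch.lower()
--         if cur is not None:
--             wordlist.append(cur)
--     return wordlist
-- ===== Notes on version B (the rewrite author's own statement) =====
-- stated objective: alternative
-- what changed: Replaces A's two-level split-then-clean-each-word passes (split() producing a word list, then per word strip + membership-filter + lower) by a single character-level state machine per line that emits a word on whitespace and filters punctuation and lowercases characters as it scans.
import Mathlib
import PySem

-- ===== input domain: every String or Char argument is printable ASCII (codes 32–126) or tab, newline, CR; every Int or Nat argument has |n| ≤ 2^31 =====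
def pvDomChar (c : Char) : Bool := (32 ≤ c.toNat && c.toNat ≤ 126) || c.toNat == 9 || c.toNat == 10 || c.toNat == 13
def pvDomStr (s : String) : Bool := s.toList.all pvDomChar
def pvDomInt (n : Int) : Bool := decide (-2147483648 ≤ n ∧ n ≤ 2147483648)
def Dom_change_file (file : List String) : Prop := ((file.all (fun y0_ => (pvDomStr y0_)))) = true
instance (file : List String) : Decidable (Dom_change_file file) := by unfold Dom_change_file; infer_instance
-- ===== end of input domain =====

-- B replaces A's split-then-clean-each-word passes by a single character-level state machine
-- per line (emit on whitespace, filter punctuation and lowercase as it goes); alternative decomposition.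

-- ===== PORT A =====
-- string.whitespace
def pvWhitespace : List Char := [' ', '\t', '\n', '\r', '\x0b', '\x0c']
-- string.punctuation
def pvPunctuation : List Char :=
  ['!', '"', '#', '$', '%', '&', '\'', '(', ')', '*', '+', ',', '-', '.', '/',
   ':', ';', '<', '=', '>', '?', '@', '[', '\\', ']', '^', '_', '`', '{', '|', '}', '~']

def change_word (word : String) : String :=
  let w := PySem.Chars.strip word.toList
  let temp := w.foldl (fun t c => if c ∉ pvWhitespace ∧ c ∉ pvPunctuation then t ++ [c] else t) ([] : List Char)
  String.ofList (PySem.Chars.lower temp)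

def change_file (file : List String) : List String :=
  file.foldl (fun wordlist part =>
    let line := PySem.Str.split₀ part
    line.foldl (fun wordlist word => wordlist ++ [change_word word]) wordlist) []

-- ===== PORT B =====
-- string.punctuation, B's copy
def pvPunctB : List Char := "!\"#$%&'()*+,-./:;<=>?@[\\]^_`{|}~".toList

-- state: (words emitted so far, the current in-progress word — none = not inside a word)
def pvAltStep (st : List String × Option (List Char)) (c : Char) : List String × Option (List Char) :=
  if PySem.Chars.isspace c then
    match st.2 with
    | none => st
    | some w => (st.1 ++ [String.ofList w], none)
  else
    let w := st.2.getD []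
    (st.1, some (if c ∈ pvPunctB then w else w ++ [PySem.Chars.lowerChar c]))

def pvAltLine (out : List String) (line : String) : List String :=
  match (line.toList.foldl pvAltStep (out, none)).2 with
  | none => (line.toList.foldl pvAltStep (out, none)).1
  | some w => (line.toList.foldl pvAltStep (out, none)).1 ++ [String.ofList w]

def change_file_alt (file : List String) : List String :=
  file.foldl pvAltLine []

-- ===== PRECONDITION & SPEC =====
def Spec_change_file (file : List String) (out : List String) : Prop := out = change_file_alt file
instance (file : List String) (out : List String) : Decidable (Spec_change_file file out) := by unfold Spec_change_file; infer_instance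

-- ===== CLAIM =====
def Claim_equal_change_file : Prop := ∀ (file : List String), Dom_change_file file → Spec_change_file file (change_file file)

-- ===== LEMMAS AND PROOFS =====

-- B's per-word cleaning, as a function of the raw (whitespace-free) word
def pvClean (w : List Char) : List Char :=
  (w.filter (fun c => c ∉ pvPunctB)).map PySem.Chars.lowerChar

theorem pvClean_append_singleton (w : List Char) (c : Char) :
    pvClean (w ++ [c]) = pvClean w ++ (if c ∈ pvPunctB then [] else [PySem.Chars.lowerChar c]) := by
  by_cases h : c ∈ pvPunctB <;> simp [pvClean, h]

-- split₀.go's accumulator is a reversed prefix of the output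
theorem split₀_go_append (cs cur : List Char) (acc : List (List Char)) :
    PySem.Chars.split₀.go cs cur acc = acc.reverse ++ PySem.Chars.split₀.go cs cur [] := by
  induction cs generalizing cur acc with
  | nil =>
    unfold PySem.Chars.split₀.go
    by_cases h : cur.isEmpty = true <;> simp [h]
  | cons c rest ih =>
    unfold PySem.Chars.split₀.go
    by_cases hs : PySem.Chars.isspace c = true
    · by_cases he : cur.isEmpty = true
      · simp only [hs, he, if_true]
        exact ih [] acc
      · simp only [hs, he, if_true, if_false, Bool.false_eq_true]
        rw [ih [] (cur.reverse :: acc), ih [] [cur.reverse]]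
        simp
    · simp only [hs, Bool.false_eq_true, if_false]
      exact ih (c :: cur) acc

-- the Option-valued current word B carries, as a function of the raw current word
def pvCurOf (raw : List Char) : Option (List Char) :=
  if raw = [] then none else some (pvClean raw.reverse)

-- MAIN INVARIANT: B's character scan emits exactly the cleaned words of split₀.go
theorem pvScan_eq (cs : List Char) (out : List String) (raw : List Char) :
    (match (cs.foldl pvAltStep (out, pvCurOf raw)).2 with
      | none => (cs.foldl pvAltStep (out, pvCurOf raw)).1
      | some w => (cs.foldl pvAltStep (out, pvCurOf raw)).1 ++ [String.ofList w])
    = out ++ (PySem.Chars.split₀.go cs raw []).map (fun w => String.ofList (pvClean w)) := by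
  induction cs generalizing out raw with
  | nil =>
    unfold PySem.Chars.split₀.go
    by_cases h : raw = []
    · simp [h, pvCurOf]
    · simp [pvCurOf, h, List.isEmpty_iff]
  | cons c rest ih =>
    unfold PySem.Chars.split₀.go
    by_cases hs : PySem.Chars.isspace c = true
    · by_cases h : raw = []
      · simp only [List.foldl_cons, pvAltStep, hs, if_true, h, pvCurOf]
        simpa [pvCurOf] using ih out []
      · simp only [List.foldl_cons, pvAltStep, hs, if_true, pvCurOf, h,
          List.isEmpty_iff, if_false]
        rw [split₀_go_append rest [] [raw.reverse]]
        have h2 := ih (out ++ [String.ofList (pvClean raw.reverse)]) []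
        rw [show pvCurOf [] = none from rfl] at h2
        rw [h2]
        simp
    · simp only [List.foldl_cons, pvAltStep, hs, Bool.false_eq_true, if_false]
      have hcur : (if c ∈ pvPunctB then (pvCurOf raw).getD [] else (pvCurOf raw).getD [] ++ [PySem.Chars.lowerChar c])
          = pvClean ((c :: raw).reverse) := by
        by_cases h : raw = [] <;>
          simp [pvCurOf, h, pvClean_append_singleton] <;> by_cases hp : c ∈ pvPunctB <;> simp [hp, pvClean]
      rw [hcur]
      have h2 := ih out (c :: raw)
      rw [show pvCurOf (c :: raw) = some (pvClean ((c :: raw).reverse)) from by simp [pvCurOf]] at h2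
      exact h2

-- each word produced by split₀ contains no whitespace character
theorem split₀_go_nospace (s cur : List Char) (acc : List (List Char))
    (hcur : ∀ c ∈ cur, PySem.Chars.isspace c = false)
    (hacc : ∀ w ∈ acc, ∀ c ∈ w, PySem.Chars.isspace c = false) :
    ∀ w ∈ PySem.Chars.split₀.go s cur acc, ∀ c ∈ w, PySem.Chars.isspace c = false := by
  induction s generalizing cur acc with
  | nil =>
    intro w hw
    unfold PySem.Chars.split₀.go at hw
    by_cases h : cur.isEmpty = true <;> simp [h] at hw
    · exact hacc w hw
    · rcases hw with hw | hw
      · exact hacc w hw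
      · subst hw; intro c hc; exact hcur c (List.mem_reverse.mp hc)
  | cons c rest ih =>
    intro w hw
    unfold PySem.Chars.split₀.go at hw
    by_cases hs : PySem.Chars.isspace c = true
    · simp only [hs, if_true] at hw
      by_cases he : cur.isEmpty = true
      · simp only [he, if_true] at hw
        exact ih [] acc (by simp) hacc w hw
      · simp only [he] at hw
        refine ih [] (cur.reverse :: acc) (by simp) ?_ w hw
        intro v hv
        rcases List.mem_cons.mp hv with hv | hv
        · subst hv; intro d hd; exact hcur d (List.mem_reverse.mp hd)
        · exact hacc v hv
    · simp only [hs] at hw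
      refine ih (c :: cur) acc ?_ hacc w hw
      intro d hd
      rcases List.mem_cons.mp hd with hd | hd
      · subst hd; exact eq_false_of_ne_true hs
      · exact hcur d hd

theorem split₀_nospace (s : List Char) :
    ∀ w ∈ PySem.Chars.split₀ s, ∀ c ∈ w, PySem.Chars.isspace c = false := by
  unfold PySem.Chars.split₀
  exact split₀_go_nospace s [] [] (by simp) (by simp)

theorem dropWhile_nospace (l : List Char) (h : ∀ c ∈ l, PySem.Chars.isspace c = false) :
    l.dropWhile PySem.Chars.isspace = l := by
  cases l with
  | nil => rfl
  | cons c rest => simp [h c (by simp)]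

theorem strip_nospace (l : List Char) (h : ∀ c ∈ l, PySem.Chars.isspace c = false) :
    PySem.Chars.strip l = l := by
  unfold PySem.Chars.strip PySem.Chars.lstrip PySem.Chars.rstrip
  rw [dropWhile_nospace l h, dropWhile_nospace l.reverse (fun c hc => h c (List.mem_reverse.mp hc)),
      List.reverse_reverse]

theorem not_mem_pvWhitespace (c : Char) (h : PySem.Chars.isspace c = false) : c ∉ pvWhitespace := by
  intro hc
  fin_cases hc <;> simp [PySem.Chars.isspace] at h

-- A's append-if loop is a filter
theorem change_word_loop (l : List Char) :
    l.foldl (fun t c => if c ∉ pvWhitespace ∧ c ∉ pvPunctuation then t ++ [c] else t) ([] : List Char)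
      = l.filter (fun c => decide (c ∉ pvWhitespace ∧ c ∉ pvPunctuation)) := by
  simpa using PySem.List.foldl_append_ite_eq_filter (fun c => c ∉ pvWhitespace ∧ c ∉ pvPunctuation) l []

-- on a whitespace-free word, A's change_word is B's clean
theorem change_word_eq_clean (w : List Char) (h : ∀ c ∈ w, PySem.Chars.isspace c = false) :
    change_word (String.ofList w) = String.ofList (pvClean w) := by
  apply String.toList_injective
  unfold change_word pvClean
  simp only [String.toList_ofList, strip_nospace w h, change_word_loop]
  rw [show PySem.Chars.lower = List.map PySem.Chars.lowerChar from rfl]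
  congr 1
  apply List.filter_congr
  intro c hc
  have hw : c ∉ pvWhitespace := not_mem_pvWhitespace c (h c hc)
  have hpb : (c ∈ pvPunctB) ↔ (c ∈ pvPunctuation) := by
    rw [show pvPunctB = pvPunctuation from by decide]
  by_cases hp : c ∈ pvPunctuation <;> simp [hw, hp, hpb]

-- B's whole-line pass equals cleaning each split₀ word
theorem pvAltLine_eq (out : List String) (line : String) :
    pvAltLine out line = out ++ (PySem.Str.split₀ line).map change_word := by
  unfold pvAltLine
  have h := pvScan_eq line.toList out []
  rw [show pvCurOf [] = none from rfl] at h
  rw [h]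
  congr 1
  rw [show PySem.Chars.split₀.go line.toList [] [] = PySem.Chars.split₀ line.toList from rfl,
      ← PySem.Str.split₀_map_toList, List.map_map]
  apply List.map_congr_left
  intro w hw
  have hns : ∀ c ∈ w.toList, PySem.Chars.isspace c = false :=
    split₀_nospace line.toList w.toList
      (by rw [← PySem.Str.split₀_map_toList]; exact List.mem_map_of_mem hw)
  simp only [Function.comp_apply]
  rw [← change_word_eq_clean w.toList hns, String.ofList_toList]

-- ===== VERDICT =====
theorem change_file_spec : Claim_equal_change_file := by
  intro file _
  unfold Spec_change_file change_file change_file_alt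
  congr 1
  funext wl part
  show (PySem.Str.split₀ part).foldl (fun wl word => wl ++ [change_word word]) wl = pvAltLine wl part
  rw [PySem.List.foldl_append_singleton_eq_map, pvAltLine_eq]
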